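-- pv_equiv track=rewrite | github.com/faizghifari/fix-your-summary | utils/labels_tags.py | convert_labels_to_one_type
-- ===== SOURCE A (Python) =====
-- def convert_labels_to_one_type(labels):
--     new_labels = []
--     current_label = None
--     for label in labels:
--         if label == "O":
--             new_labels.append("O")
--             current_label = "O"
--         else:
--             if current_label == "O" or current_label is None:
--                 new_label = "B-D"
--             else:
--                 new_label = "I-D"
--             new_labels.append(new_label)
--             current_label = new_label
--     return new_labels
-- ===== SOURCE B (Python) =====
-- def convert_labels_to_one_type(labels):
--     # Stateless one-pass: each output depends only on the label and its predecessor
--     # (sentinel "O" before the first element, since a fresh start behaves like after "O").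
--     return ["O" if lab == "O" else ("B-D" if prev == "O" else "I-D")
--             for prev, lab in zip(["O"] + list(labels), labels)]
-- ===== Notes on version B (the rewrite author's own statement) =====
-- stated objective: simpler
-- what changed: Replaced the mutable current_label state machine with a stateless comprehension over (previous label, label) pairs: the output is 'O' for 'O', 'B-D' right after an 'O' (or at the start), else 'I-D'.
import Mathlib
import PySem

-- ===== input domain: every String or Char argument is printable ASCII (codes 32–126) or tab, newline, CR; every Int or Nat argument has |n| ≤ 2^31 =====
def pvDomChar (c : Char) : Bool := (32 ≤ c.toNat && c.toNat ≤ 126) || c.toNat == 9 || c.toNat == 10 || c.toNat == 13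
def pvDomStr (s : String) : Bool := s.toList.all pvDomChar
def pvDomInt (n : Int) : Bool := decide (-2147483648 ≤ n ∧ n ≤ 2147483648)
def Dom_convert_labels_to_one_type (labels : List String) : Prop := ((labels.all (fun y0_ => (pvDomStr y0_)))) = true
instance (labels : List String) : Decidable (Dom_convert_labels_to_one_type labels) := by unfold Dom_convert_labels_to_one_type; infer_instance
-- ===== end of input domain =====

-- B replaces A's mutable current_label state machine by a stateless pass over (previous label, label) pairs — same cost, plainer code.
-- ===== PORT A =====
-- Literal port of A: fold over the labels carrying (new_labels, current_label : Option String).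
def pvGoA (labels : List String) (new_labels : List String) (current_label : Option String) : List String :=
  match labels with
  | [] => new_labels
  | label :: rest =>
    if label = "O" then
      pvGoA rest (new_labels ++ ["O"]) (some "O")
    else
      let new_label := if current_label = some "O" ∨ current_label = none then "B-D" else "I-D"
      pvGoA rest (new_labels ++ [new_label]) (some new_label)

def convert_labels_to_one_type (labels : List String) : List String :=
  pvGoA labels [] none

-- ===== PORT B =====
-- Port of B: stateless map over zip of ("O" :: labels) with labels.
def pvF (pl : String × String) : String :=
  if pl.2 = "O" then "O" else if pl.1 = "O" then "B-D" else "I-D"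

def convert_labels_to_one_type_alt (labels : List String) : List String :=
  (List.zip ("O" :: labels) labels).map pvF

-- ===== PRECONDITION & SPEC =====
def Spec_convert_labels_to_one_type (labels : List String) (out : List String) : Prop := out = convert_labels_to_one_type_alt labels
instance (labels : List String) (out : List String) : Decidable (Spec_convert_labels_to_one_type labels out) := by unfold Spec_convert_labels_to_one_type; infer_instance

-- ===== CLAIM (what is proved, stated in full; the proofs are below) =====
def Claim_equal_convert_labels_to_one_type : Prop := ∀ (labels : List String), Dom_convert_labels_to_one_type labels → Spec_convert_labels_to_one_type labels (convert_labels_to_one_type labels)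

-- ===== LEMMAS AND PROOFS =====

-- ===== VERDICT (by name: the statement is the Claim_ definition above) =====
-- pvF ignores everything about the previous label except whether it equals "O".
theorem pvF_head_congr (p₁ p₂ : String) (ls : List String) (h : (p₁ = "O") ↔ (p₂ = "O")) :
    (List.zip (p₁ :: ls) ls).map pvF = (List.zip (p₂ :: ls) ls).map pvF := by
  cases ls with
  | nil => rfl
  | cons l ls' =>
    simp only [List.zip_cons_cons, List.map_cons, pvF]
    by_cases hl : l = "O" <;> by_cases h1 : p₁ = "O" <;>
      simp_all

-- A's loop, started with current_label = some p, produces B's stateless pass with previous label p.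
theorem pvGoA_some (ls : List String) : ∀ (acc : List String) (p : String),
    pvGoA ls acc (some p) = acc ++ (List.zip (p :: ls) ls).map pvF := by
  induction ls with
  | nil => intro acc p; simp [pvGoA]
  | cons l ls ih =>
    intro acc p
    by_cases hl : l = "O"
    · subst hl
      simp only [pvGoA, ih]
      simp [pvF]
    · by_cases hp : p = "O"
      · subst hp
        simp only [pvGoA, if_neg hl]
        simp only [reduceCtorEq, or_false]
        rw [ih]
        have := pvF_head_congr "B-D" l ls (by simp [hl])
        simp [this, pvF, hl]
      · simp only [pvGoA, if_neg hl]
        have : ¬((some p : Option String) = some "O" ∨ (some p : Option String) = none) := by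
          simp [hp]
        simp only [if_neg this]
        rw [ih]
        have := pvF_head_congr "I-D" l ls (by simp [hl])
        simp [this, pvF, hl, hp]

theorem convert_labels_to_one_type_spec : Claim_equal_convert_labels_to_one_type := by
  intro labels _
  show convert_labels_to_one_type labels = convert_labels_to_one_type_alt labels
  unfold convert_labels_to_one_type convert_labels_to_one_type_alt
  cases labels with
  | nil => rfl
  | cons l ls =>
    by_cases hl : l = "O"
    · subst hl
      simp only [pvGoA, pvGoA_some]
      simp [pvF]
    · simp only [pvGoA, if_neg hl]
      simp only [reduceCtorEq, or_true, ite_true]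
      rw [pvGoA_some]
      have h2 := pvF_head_congr l "B-D" ls (by simp [hl])
      simp [pvF, hl, ← h2]
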